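-- pv_equiv track=rewrite | github.com/han9898/codingtest-study | Programmers/sohee/cola.py | solution
-- ===== SOURCE A (Python) =====
-- def solution(a, b, n):
--     answer = 0
--
--     while a <= n:
--         remain_B = n % a
--         n = (n//a) * b
--         answer += n
--         n += remain_B
--
--     return answer
-- ===== SOURCE B (Python) =====
-- def solution(a, b, n):
--     if n < a:
--         return 0
--     return (n - b) // (a - b) * b
-- ===== Notes on version B (the rewrite author's own statement) =====
-- stated objective: simpler
-- what changed: Replaces the exchange-simulation while-loop with the closed form (n-b)//(a-b)*b behind the guard n<a (each exchange round nets a loss of a-b bottles, so the number of single exchanges is (n-b)//(a-b)).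
-- outside the precondition, e.g. on solution(4, -13, 19): A returns -52, B returns -13; on solution(-2, 1, 5): A returns -3, B returns -2; on solution(0, 1, 5): A raises ZeroDivisionError, B returns -4
import Mathlib
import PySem

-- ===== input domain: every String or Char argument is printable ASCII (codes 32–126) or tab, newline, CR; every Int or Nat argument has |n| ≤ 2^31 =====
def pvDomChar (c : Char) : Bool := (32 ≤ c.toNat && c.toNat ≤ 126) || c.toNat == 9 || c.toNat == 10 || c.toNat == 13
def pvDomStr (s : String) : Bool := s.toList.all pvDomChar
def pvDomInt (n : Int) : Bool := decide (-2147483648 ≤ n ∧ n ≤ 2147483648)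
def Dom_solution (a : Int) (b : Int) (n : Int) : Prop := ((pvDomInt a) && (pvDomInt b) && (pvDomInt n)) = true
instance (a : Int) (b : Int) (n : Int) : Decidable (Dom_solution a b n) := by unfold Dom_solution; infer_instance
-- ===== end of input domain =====

-- B replaces A's exchange-simulation loop with the closed form (n-b)//(a-b)*b (simpler, O(1)).

-- ===== PORT A =====
-- A's while-loop; the fuel argument only makes the recursion total (on Pre_ inputs the
-- loop variable n strictly decreases and stays ≥ 0, so fuel n.toNat + 1 never runs out).
def solutionLoop : Nat → Int → Int → Int → Int → Int
  | 0, _, _, _, answer => answer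
  | fuel + 1, a, b, n, answer =>
    if a ≤ n then
      let remainB := PySem.Int.mod n a
      let n1 := (PySem.Int.floordiv n a) * b
      solutionLoop fuel a b (n1 + remainB) (answer + n1)
    else answer

def solution (a : Int) (b : Int) (n : Int) : Int :=
  solutionLoop (n.toNat + 1) a b n 0

-- ===== PORT B =====
def solution_alt (a : Int) (b : Int) (n : Int) : Int :=
  if n < a then 0 else PySem.Int.floordiv (n - b) (a - b) * b

-- ===== PRECONDITION & SPEC =====
-- Pre_ excludes inputs with a ≤ n where a ≤ 0, b < 0 or b ≥ a: there A's loop raises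
-- ZeroDivisionError (a = 0), never terminates (1 ≤ a ≤ b), or returns accidental values of
-- Python's floor division on negative operands that no caller of this exchange task would specify.
def Pre_solution (a : Int) (b : Int) (n : Int) : Prop :=
  n < a ∨ (1 ≤ a ∧ 0 ≤ b ∧ b < a)
instance (a : Int) (b : Int) (n : Int) : Decidable (Pre_solution a b n) := by
  unfold Pre_solution; infer_instance

def pvWitness_solution : Int × Int × Int := (3, 1, 10)

def Spec_solution (a : Int) (b : Int) (n : Int) (out : Int) : Prop := out = solution_alt a b n
instance (a : Int) (b : Int) (n : Int) (out : Int) : Decidable (Spec_solution a b n out) := by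
  unfold Spec_solution; infer_instance

-- ===== CLAIM (what is proved, stated in full; the proofs are below) =====
def Claim_equal_solution : Prop := ∀ (a : Int) (b : Int) (n : Int),
  Dom_solution a b n → Pre_solution a b n → Spec_solution a b n (solution a b n)

-- ===== LEMMAS AND PROOFS =====

-- loop invariant: under 1 ≤ a, 0 ≤ b < a, the loop adds solution_alt a b n to the accumulator
theorem solutionLoop_closed (a b : Int) (ha : 1 ≤ a) (hb : 0 ≤ b) (hba : b < a) :
    ∀ (fuel : Nat) (n acc : Int), n.toNat < fuel →
      solutionLoop fuel a b n acc = acc + solution_alt a b n := by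
  intro fuel
  induction fuel with
  | zero => intro n acc h; omega
  | succ f ih =>
    intro n acc h
    by_cases hle : a ≤ n
    · have ha0 : (0:Int) < a := by omega
      have hd : PySem.Int.floordiv n a = n / a := PySem.Int.floordiv_eq_ediv_of_pos ha0
      have hm : PySem.Int.mod n a = n % a := PySem.Int.mod_eq_emod_of_pos ha0
      set q := n / a with hq
      set r := n % a with hr
      have hq1 : 1 ≤ q := by
        rw [hq, Int.le_ediv_iff_mul_le ha0]; omega
      have hr0 : 0 ≤ r := Int.emod_nonneg n (by omega)
      have hra : r < a := Int.emod_lt_of_pos n ha0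
      have hn : a * q + r = n := by rw [hq, hr]; exact Int.mul_ediv_add_emod n a
      have hn1nonneg : 0 ≤ q * b + r := by positivity
      have hn1lt : q * b + r < n := by nlinarith
      have hfuel : (q * b + r).toNat < f := by omega
      rw [solutionLoop, if_pos hle, hd, hm]
      rw [ih (q * b + r) (acc + q * b) hfuel]
      -- remains: acc + q*b + alt (q*b+r) = acc + alt n
      have hab0 : (0:Int) < a - b := by omega
      have hbn1 : b ≤ q * b + r := by nlinarith
      -- alt m = (m-b)/(a-b)*b for b ≤ m (when m < a the quotient is 0)
      have altE : ∀ m : Int, b ≤ m →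
          solution_alt a b m = PySem.Int.floordiv (m - b) (a - b) * b := by
        intro m hm'
        unfold solution_alt
        split_ifs with hma
        · have : PySem.Int.floordiv (m - b) (a - b) = 0 := by
            rw [PySem.Int.floordiv_eq_ediv_of_pos hab0]
            exact Int.ediv_eq_zero_of_lt (by omega) (by omega)
          rw [this]; ring
        · rfl
      rw [altE n (by omega), altE (q * b + r) hbn1]
      rw [PySem.Int.floordiv_eq_ediv_of_pos hab0, PySem.Int.floordiv_eq_ediv_of_pos hab0]
      have hsplit : n - b = (q * b + r - b) + q * (a - b) := by linear_combination -hn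
      rw [hsplit, Int.add_mul_ediv_right _ _ (by omega : a - b ≠ 0)]
      ring
    · rw [solutionLoop, if_neg hle]
      unfold solution_alt
      rw [if_pos (by omega)]
      ring

-- ===== VERDICT (by name: the statement is the Claim_ definition above) =====
theorem solution_spec : Claim_equal_solution := by
  intro a b n _ hpre
  unfold Spec_solution solution
  rcases hpre with hlt | ⟨ha, hb, hba⟩
  · rw [solutionLoop, if_neg (by omega)]
    unfold solution_alt
    rw [if_pos hlt]
  · exact (solutionLoop_closed a b ha hb hba (n.toNat + 1) n 0 (by omega)).trans (by ring_nf)
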